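-- pv_equiv track=rewrite | github.com/KarolWes/Convolutional_Coding | main.py | convolutional_encoder_base
-- ===== SOURCE A (Python) =====
-- def convolutional_encoder_base(u: [int], generator: [list], start_state=[0, 0]):
--     v = [[] for _ in range(len(generator))]
--     memory = start_state
--     for el_u in u:
--         res, memory = convolutional_encoder(el_u, generator, memory)
--         for i in range(len(res)):
--             v[i].append(res[i])
--     return v
--
-- def convolutional_encoder(bit: int, generator: [list], start_state=[0, 0]):
--     m = len(start_state)
--     memory = [bit] + start_state
--     res = [0] * len(generator)
--     for i in range(m + 1):
--         for j in range(len(generator)):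
--             res[j] += memory[i] * generator[j][i]
--     return [x % 2 for x in res], memory[:-1]
-- ===== SOURCE B (Python) =====
-- def convolutional_encoder_base(u: [int], generator: [list], start_state=[0, 0]):
--     # Sliding-window correlation over one padded array: no shift-register state,
--     # no helper; generator-major instead of bit-major.
--     m = len(start_state)
--     padded = list(reversed(start_state)) + list(u)
--     return [[sum(g[i] * padded[m + t - i] for i in range(m + 1)) % 2
--              for t in range(len(u))]
--             for g in generator]
-- ===== Notes on version B (the rewrite author's own statement) =====
-- stated objective: simpler
-- what changed: Replaces the per-bit shift-register helper (threaded memory state plus an in-place res/v update loop) by a direct generator-major sliding-window correlation over a single padded array built once from reversed(start_state)+u.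
import Mathlib
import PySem

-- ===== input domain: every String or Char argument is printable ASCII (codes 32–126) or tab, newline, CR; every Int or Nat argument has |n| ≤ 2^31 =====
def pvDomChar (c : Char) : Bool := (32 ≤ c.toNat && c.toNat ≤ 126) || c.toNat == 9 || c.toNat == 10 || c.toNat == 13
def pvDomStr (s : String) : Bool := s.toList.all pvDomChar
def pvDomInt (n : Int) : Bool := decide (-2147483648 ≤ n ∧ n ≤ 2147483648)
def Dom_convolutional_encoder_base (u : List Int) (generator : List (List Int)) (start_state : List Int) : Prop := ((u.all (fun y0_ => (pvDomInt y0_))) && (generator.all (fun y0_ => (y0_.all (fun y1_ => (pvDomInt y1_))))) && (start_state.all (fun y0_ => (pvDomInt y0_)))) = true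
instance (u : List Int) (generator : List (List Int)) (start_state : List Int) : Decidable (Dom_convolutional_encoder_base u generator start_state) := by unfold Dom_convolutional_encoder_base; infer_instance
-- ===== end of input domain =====

-- B replaces the per-bit shift-register helper by a generator-major sliding-window
-- correlation over one padded array (objective: simpler). Equivalence of return values on Pre_.

-- ===== PORT A =====
-- helper 'convolutional_encoder': res[j] += memory[i]*generator[j][i] loops as nested
-- foldl over ranges with List.set; out-of-range generator[j][i] would raise in Python
-- (excluded by Pre_), here getD.
def pvEncStep (bit : Int) (generator : List (List Int)) (start_state : List Int) :
    List Int × List Int :=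
  let m := start_state.length
  let memory := bit :: start_state
  let res0 : List Int := List.replicate generator.length 0
  let res := (List.range (m + 1)).foldl (fun res i =>
      (List.range generator.length).foldl (fun res j =>
          res.set j ((res.getD j 0) + (memory.getD i 0) * ((generator.getD j []).getD i 0))) res)
    res0
  (res.map (fun x => PySem.Int.mod x 2), memory.dropLast)

def convolutional_encoder_base (u : List Int) (generator : List (List Int)) (start_state : List Int) : List (List Int) :=
  let v : List (List Int) := (List.range generator.length).map (fun _ => [])
  (u.foldl (fun (acc : List (List Int) × List Int) el_u =>
      let p := pvEncStep el_u generator acc.2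
      ((List.range p.1.length).foldl
          (fun v i => v.set i ((v.getD i []) ++ [p.1.getD i 0])) acc.1,
       p.2))
    (v, start_state)).1

-- ===== PORT B =====
def convolutional_encoder_base_alt (u : List Int) (generator : List (List Int)) (start_state : List Int) : List (List Int) :=
  let m := start_state.length
  let padded := start_state.reverse ++ u
  generator.map (fun g =>
    (List.range u.length).map (fun t =>
      PySem.Int.mod
        ((List.range (m + 1)).foldl (fun s i => s + (g.getD i 0) * (padded.getD (m + t - i) 0)) 0)
        2))

-- ===== PRECONDITION & SPEC =====
-- Pre_ excludes exactly the inputs where Python A raises IndexError: a non-empty u with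
-- some generator row shorter than len(start_state)+1 (B raises identically there).
def Pre_convolutional_encoder_base (u : List Int) (generator : List (List Int)) (start_state : List Int) : Prop :=
  u = [] ∨ ∀ g ∈ generator, start_state.length + 1 ≤ g.length
instance (u : List Int) (generator : List (List Int)) (start_state : List Int) : Decidable (Pre_convolutional_encoder_base u generator start_state) := by unfold Pre_convolutional_encoder_base; infer_instance

def pvWitness_convolutional_encoder_base : List Int × List (List Int) × List Int :=
  ([1, 0, 1, 1], [[1, 1, 1], [1, 0, 1]], [0, 0])

def Spec_convolutional_encoder_base (u : List Int) (generator : List (List Int)) (start_state : List Int) (out : List (List Int)) : Prop := out = convolutional_encoder_base_alt u generator start_state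
instance (u : List Int) (generator : List (List Int)) (start_state : List Int) (out : List (List Int)) : Decidable (Spec_convolutional_encoder_base u generator start_state out) := by unfold Spec_convolutional_encoder_base; infer_instance

-- ===== CLAIM (what is proved, stated in full; the proofs are below) =====
def Claim_equal_convolutional_encoder_base : Prop := ∀ (u : List Int) (generator : List (List Int)) (start_state : List Int), Dom_convolutional_encoder_base u generator start_state → Pre_convolutional_encoder_base u generator start_state → Spec_convolutional_encoder_base u generator start_state (convolutional_encoder_base u generator start_state)

-- ===== LEMMAS AND PROOFS =====

-- per-row head value of one encoder step (proof-only abbreviation)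
def pvHead (b : Int) (state : List Int) (g : List Int) : Int :=
  PySem.Int.mod
    ((List.range (state.length + 1)).foldl
      (fun s i => s + ((b :: state).getD i 0) * (g.getD i 0)) 0) 2

-- reference per-row stream: head for memory = b :: state, next state = memory.dropLast
def pvR (g : List Int) : List Int → List Int → List Int
  | [], _ => []
  | b :: rest, state => pvHead b state g :: pvR g rest ((b :: state).dropLast)

-- entry-wise description of the 'set at j' loop over range' k n
theorem pv_set_loop {α : Type} (f : Nat → α → α) (d : α) :
    ∀ (n k : Nat) (res : List α), res.length = k + n →
      ∀ j, ((List.range' k n).foldl (fun r j => r.set j (f j (r.getD j d))) res)[j]?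
        = if k ≤ j ∧ j < k + n then (res[j]?).map (f j) else res[j]? := by
  intro n
  induction n with
  | zero =>
      intro k res h j
      simp only [List.range', List.foldl_nil]
      rw [if_neg (by omega)]
  | succ n ih =>
      intro k res h j
      have hk : k < res.length := by omega
      rw [List.range'_succ, List.foldl_cons]
      have h1 : (res.set k (f k (res.getD k d))).length = (k + 1) + n := by
        simp [List.length_set]; omega
      rw [ih (k + 1) _ h1 j]
      simp only [List.getElem?_set]
      split_ifs <;> try rfl
      all_goals try omega
      all_goals subst_vars
      all_goals simp [List.getElem?_eq_getElem hk]

-- the inner 'set at j' loop on a map-shaped list updates each row independently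
theorem pv_map_loop {α β : Type} (gen : List β) (dβ : β) (f : β → α → α) (h : β → α) (d : α) :
    (List.range gen.length).foldl
        (fun res j => res.set j (f (gen.getD j dβ) (res.getD j d))) (gen.map h)
      = gen.map (fun g => f g (h g)) := by
  apply List.ext_getElem?
  intro j
  have hlen : (gen.map h).length = 0 + gen.length := by simp
  have := pv_set_loop (fun j x => f (gen.getD j dβ) x) d gen.length 0 (gen.map h) hlen j
  rw [List.range_eq_range', this]
  by_cases hj : j < gen.length
  · rw [if_pos (by omega)]
    rw [List.getElem?_eq_getElem (by simpa using hj),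
      List.getElem?_eq_getElem (by simpa using hj)]
    simp [List.getElem?_eq_getElem hj]
  · rw [if_neg (by omega)]
    rw [List.getElem?_eq_none (by simpa using hj), List.getElem?_eq_none (by simpa using hj)]

theorem pv_append_loop (gen : List (List Int)) (hv : List Int → List Int) (c : List Int → Int) :
    (List.range (gen.map c).length).foldl
        (fun v i => v.set i ((v.getD i []) ++ [(gen.map c).getD i 0])) (gen.map hv)
      = gen.map (fun g => hv g ++ [c g]) := by
  have hcong :
      (List.range gen.length).foldl
          (fun v i => v.set i ((v.getD i []) ++ [(gen.map c).getD i 0])) (gen.map hv)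
        = (List.range gen.length).foldl
          (fun v i => v.set i ((v.getD i []) ++ [c (gen.getD i [])])) (gen.map hv) := by
    apply PySem.List.foldl_congr_mem
    intro acc i hm
    have hi : i < gen.length := List.mem_range.mp hm
    rw [List.getD_eq_getElem (gen.map c) 0 (by simpa using hi), List.getElem_map,
      List.getD_eq_getElem gen [] hi]
  rw [List.length_map, hcong,
    pv_map_loop gen [] (fun g x => x ++ [c g]) hv []]

theorem pv_outer_loop (gen : List (List Int)) (mem : List Int) :
    ∀ (I : List Nat) (h : List Int → Int),
      I.foldl (fun res i =>
          (List.range gen.length).foldl (fun res j =>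
            res.set j ((res.getD j 0) + (mem.getD i 0) * ((gen.getD j []).getD i 0))) res)
        (gen.map h)
      = gen.map (fun g => I.foldl (fun s i => s + (mem.getD i 0) * (g.getD i 0)) (h g)) := by
  intro I
  induction I with
  | nil => intro h; simp
  | cons i I ih =>
      intro h
      rw [List.foldl_cons,
        pv_map_loop gen [] (fun g x => x + (mem.getD i 0) * (g.getD i 0)) h 0,
        ih (fun g => h g + (mem.getD i 0) * (g.getD i 0))]
      simp [List.foldl_cons]

theorem pvEncStep_eq (b : Int) (gen : List (List Int)) (state : List Int) :
    pvEncStep b gen state = (gen.map (pvHead b state), (b :: state).dropLast) := by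
  simp only [pvEncStep]
  have h0 : (List.replicate gen.length (0 : Int)) = gen.map (fun _ => 0) := by
    simp [List.map_const']
  rw [h0, pv_outer_loop gen (b :: state) (List.range (state.length + 1)) (fun _ => 0),
    List.map_map]
  rfl

theorem pv_main (gen : List (List Int)) :
    ∀ (u : List Int) (state : List Int) (hv : List Int → List Int),
      (u.foldl (fun (acc : List (List Int) × List Int) el_u =>
          let p := pvEncStep el_u gen acc.2
          ((List.range p.1.length).foldl
              (fun v i => v.set i ((v.getD i []) ++ [p.1.getD i 0])) acc.1,
           p.2))
        (gen.map hv, state)).1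
      = gen.map (fun g => hv g ++ pvR g u state) := by
  intro u
  induction u with
  | nil => intro state hv; simp [pvR]
  | cons b rest ih =>
      intro state hv
      rw [List.foldl_cons]
      have hinit :
          (let p := pvEncStep b gen ((gen.map hv, state) : List (List Int) × List Int).2
           ((List.range p.1.length).foldl
              (fun v i => v.set i ((v.getD i []) ++ [p.1.getD i 0]))
              ((gen.map hv, state) : List (List Int) × List Int).1,
            p.2))
          = (gen.map (fun g => hv g ++ [pvHead b state g]), (b :: state).dropLast) := by
        simp only [pvEncStep_eq]
        rw [pv_append_loop gen hv (pvHead b state)]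
      rw [hinit, ih ((b :: state).dropLast) (fun g => hv g ++ [pvHead b state g])]
      simp [pvR, List.append_assoc]

theorem pv_padded_tail (state : List Int) (b : Int) (rest : List Int) :
    ((b :: state).dropLast).reverse ++ rest = (state.reverse ++ b :: rest).tail := by
  rcases List.eq_nil_or_concat state with h | ⟨q, a, h⟩
  · subst h; simp
  · subst h
    simp only [List.concat_eq_append]
    have h1 : (b :: (q ++ [a])).dropLast = b :: q := by
      have : b :: (q ++ [a]) = (b :: q) ++ [a] := by simp
      rw [this, List.dropLast_concat]
    rw [h1]
    simp

theorem pv_padded_getD (state rest : List Int) (b : Int) (i : Nat) (hi : i ≤ state.length) :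
    (state.reverse ++ b :: rest).getD (state.length - i) 0 = (b :: state).getD i 0 := by
  have hlen : state.length - i < (state.reverse ++ b :: rest).length := by
    simp; omega
  rw [List.getD_eq_getElem _ 0 hlen]
  cases i with
  | zero =>
      rw [List.getElem_append_right (by simp)]
      simp
  | succ i' =>
      have hi' : state.length - (i' + 1) < state.reverse.length := by simp; omega
      rw [List.getElem_append_left hi', List.getElem_reverse]
      have h3 : state.length - 1 - (state.length - (i' + 1)) = i' := by omega
      simp only [h3]
      rw [List.getD_eq_getElem _ 0 (by simp; omega), List.getElem_cons_succ]

theorem pv_tail_getD {α : Type} (l : List α) (k : Nat) (d : α) :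
    l.tail.getD k d = l.getD (k + 1) d := by
  cases l <;> simp [List.getD]

theorem pv_alt_row (g : List Int) :
    ∀ (u state : List Int),
      (List.range u.length).map (fun t =>
        PySem.Int.mod
          ((List.range (state.length + 1)).foldl
            (fun s i => s + (g.getD i 0) * ((state.reverse ++ u).getD (state.length + t - i) 0)) 0)
          2)
      = pvR g u state := by
  intro u
  induction u with
  | nil => intro state; simp [pvR]
  | cons b rest ih =>
      intro state
      rw [List.length_cons,
        show List.range (rest.length + 1) = 0 :: (List.range rest.length).map Nat.succ from
          List.range_succ_eq_map,
        List.map_cons, List.map_map]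
      have hhead :
          PySem.Int.mod
            ((List.range (state.length + 1)).foldl
              (fun s i => s + (g.getD i 0) * ((state.reverse ++ b :: rest).getD (state.length + 0 - i) 0)) 0) 2
          = pvHead b state g := by
        unfold pvHead
        congr 1
        apply PySem.List.foldl_congr_mem
        intro acc i hmem
        have hi : i ≤ state.length := by
          have := List.mem_range.mp hmem; omega
        rw [Nat.add_zero, pv_padded_getD state rest b i hi, Int.mul_comm]
      have hstate : ((b :: state).dropLast).length = state.length := by simp
      have hrest : (List.range rest.length).map
          ((fun t =>
            PySem.Int.mod
              ((List.range (state.length + 1)).foldl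
                (fun s i => s + (g.getD i 0) * ((state.reverse ++ b :: rest).getD (state.length + t - i) 0)) 0) 2) ∘ Nat.succ)
          = pvR g rest ((b :: state).dropLast) := by
        rw [← ih ((b :: state).dropLast)]
        apply List.map_congr_left
        intro t _
        simp only [Function.comp_apply, hstate]
        congr 1
        apply PySem.List.foldl_congr_mem
        intro acc i hmem
        have hi : i ≤ state.length := by
          have := List.mem_range.mp hmem; omega
        congr 1
        rw [show state.length + t.succ - i = (state.length + t - i) + 1 from by omega,
          pv_padded_tail state b rest, pv_tail_getD]
      rw [hhead, hrest, pvR]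

theorem pv_init_v (gen : List (List Int)) :
    (List.range gen.length).map (fun _ => ([] : List Int)) = gen.map (fun _ => []) := by
  simp [List.map_const']

-- ===== VERDICT (by name: the statement is the Claim_ definition above) =====
theorem convolutional_encoder_base_spec : Claim_equal_convolutional_encoder_base := by
  intro u gen s _ _
  unfold Spec_convolutional_encoder_base convolutional_encoder_base convolutional_encoder_base_alt
  rw [pv_init_v gen, pv_main gen u s (fun _ => [])]
  simp only [List.nil_append]
  apply List.map_congr_left
  intro g _
  exact (pv_alt_row g u s).symm
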